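-- pv_equiv track=rewrite | github.com/loperamos/adventofcode | year_2021/ex_16/main.py | compute_num
-- ===== SOURCE A (Python) =====
-- def compute_num(bin_num, idx) -> tuple[int, int]:
--     n = ""
--     while bin_num[idx] != "0":
--         idx += 1
--         n += bin_num[idx:idx + 4]
--         idx += 4
--     idx += 1
--     n += bin_num[idx:idx + 4]
--     idx += 4
--     return idx, int(n, 2)
-- ===== SOURCE B (Python) =====
-- def compute_num(bin_num, idx) -> tuple[int, int]:
--     # pass 1: scan only the flag bits (every 5th position) to find the group count
--     k = 0
--     while bin_num[idx + 5 * k] != "0":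
--         k += 1
--     # pass 2: gather the 4-bit payloads of all k+1 groups and parse once
--     groups = [bin_num[idx + 5 * j + 1: idx + 5 * j + 5] for j in range(k + 1)]
--     return idx + 5 * (k + 1), int("".join(groups), 2)
-- ===== Notes on version B (the rewrite author's own statement) =====
-- stated objective: alternative
-- what changed: A is one incremental pass that advances idx and grows a bit string group by group; B is two staged passes: first scan only the flag bits at idx+5k to count the groups, then gather all 4-bit payloads with a comprehension, join them and parse once.
-- outside the precondition, e.g. on compute_num('0  11', 0): A returns (5, 3), B returns (5, 3)
import Mathlib
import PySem

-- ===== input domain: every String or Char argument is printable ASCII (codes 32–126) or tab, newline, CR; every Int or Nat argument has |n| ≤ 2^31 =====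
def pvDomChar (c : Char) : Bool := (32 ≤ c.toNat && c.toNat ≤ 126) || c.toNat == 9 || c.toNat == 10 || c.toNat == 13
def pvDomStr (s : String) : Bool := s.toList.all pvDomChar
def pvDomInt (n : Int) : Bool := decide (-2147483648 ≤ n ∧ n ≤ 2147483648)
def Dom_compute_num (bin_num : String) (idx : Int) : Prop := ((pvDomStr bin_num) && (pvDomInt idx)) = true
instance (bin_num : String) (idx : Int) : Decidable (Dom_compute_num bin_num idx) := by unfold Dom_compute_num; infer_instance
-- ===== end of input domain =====

-- B replaces A's single incremental pass (advance idx, grow a bit string) by two staged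
-- passes: count the groups by scanning only the flag bits, then gather all payload slices
-- and parse once (objective: alternative decomposition; return value only).

-- int(n, 2): exact on nonempty strings of '0'/'1' digits; Pre_compute_num admits only such
-- collected bit strings
def pvBin (l : List Char) : Int :=
  l.foldl (fun a c => 2 * a + (if c = '1' then 1 else 0)) 0

-- ===== PORT A =====
def computeNumLoop (s : List Char) (idx : Int) (n : List Char) : Int × Int :=
  match h : PySem.List.pyGet? s idx with
  | none => (0, 0)   -- IndexError in Python; unreachable under Pre_compute_num
  | some c =>
    if c ≠ '0' then
      computeNumLoop s (idx + 5) (n ++ PySem.List.slice s (some (idx + 1)) (some (idx + 5)))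
    else
      (idx + 5, pvBin (n ++ PySem.List.slice s (some (idx + 1)) (some (idx + 5))))
termination_by ((s.length : Int) - idx).toNat
decreasing_by
  have hin : PySem.Raise.InRange s.length idx := by
    by_contra hc
    rw [← PySem.List.pyGet?_eq_none_iff (xs := s) (i := idx)] at hc
    simp [hc] at h
  rcases hin with ⟨-, h2⟩
  omega

def compute_num (bin_num : String) (idx : Int) : Int × Int :=
  computeNumLoop bin_num.toList idx []

-- ===== PORT B =====
-- pass 1 of Source B: `k = 0; while bin_num[idx + 5*k] != "0": k += 1`
def countGroups (s : List Char) (idx : Int) (k : Nat) : Nat :=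
  match h : PySem.List.pyGet? s (idx + 5 * k) with
  | none => 0   -- IndexError in Python; unreachable under Pre_compute_num
  | some c => if c ≠ '0' then countGroups s idx (k + 1) else k
termination_by ((s.length : Int) - (idx + 5 * k)).toNat
decreasing_by
  have hin : PySem.Raise.InRange s.length (idx + 5 * k) := by
    by_contra hc
    rw [← PySem.List.pyGet?_eq_none_iff (xs := s) (i := idx + 5 * k)] at hc
    simp [hc] at h
  rcases hin with ⟨-, h2⟩
  push_cast
  omega

-- pass 2 of Source B: the list comprehension of the k+1 payload slices
def pvGroups (s : List Char) (idx : Int) (k : Nat) : List (List Char) :=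
  (List.range (k + 1)).map
    (fun (j : Nat) => PySem.List.slice s (some (idx + 5 * (j : Int) + 1)) (some (idx + 5 * (j : Int) + 5)))

def compute_num_alt (bin_num : String) (idx : Int) : Int × Int :=
  (idx + 5 * ((countGroups bin_num.toList idx 0 : Int) + 1),
   pvBin (pvGroups bin_num.toList idx (countGroups bin_num.toList idx 0)).flatten)

-- ===== PRECONDITION & SPEC =====
-- Pre_ excludes inputs on which Python A raises (IndexError reading a flag bit, ValueError
-- from int(n, 2) on an empty or non-binary collected string), and the rare inputs where A
-- returns only thanks to int()'s tolerance of whitespace/underscores around the binary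
-- digits — there B's Python returns the same value, but the Lean int-port is exact only on
-- pure '0'/'1' strings.
def pvFlagNot0 (s : List Char) (idx : Int) (j : Nat) : Bool :=
  match PySem.List.pyGet? s (idx + 5 * j) with
  | none => false
  | some c => c != '0'

def pvGroupOk (s : List Char) (idx : Int) (j : Nat) : Bool :=
  (PySem.List.slice s (some (idx + 5 * j + 1)) (some (idx + 5 * j + 5))).all
    (fun c => c == '0' || c == '1')

-- at group count k: the k flag bits before it are non-'0', the flag at idx+5k is '0',
-- some payload slice is nonempty and every payload character is a binary digit
def pvPreAt (s : List Char) (idx : Int) (k : Nat) : Bool :=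
  (List.range k).all (pvFlagNot0 s idx) &&
  (PySem.List.pyGet? s (idx + 5 * k) == some '0') &&
  ((List.range (k + 1)).any
    (fun j => !(PySem.List.slice s (some (idx + 5 * j + 1)) (some (idx + 5 * j + 5))).isEmpty)) &&
  (List.range (k + 1)).all (pvGroupOk s idx)

def Pre_compute_num (bin_num : String) (idx : Int) : Prop :=
  ∃ k < bin_num.toList.length + 1, pvPreAt bin_num.toList idx k = true

instance (bin_num : String) (idx : Int) : Decidable (Pre_compute_num bin_num idx) := by
  unfold Pre_compute_num; infer_instance

def pvWitness_compute_num : String × Int := ("01111", 0)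

def Spec_compute_num (bin_num : String) (idx : Int) (out : Int × Int) : Prop := out = compute_num_alt bin_num idx
instance (bin_num : String) (idx : Int) (out : Int × Int) : Decidable (Spec_compute_num bin_num idx out) := by unfold Spec_compute_num; infer_instance

-- ===== CLAIM (what is proved, stated in full; the proofs are below) =====
def Claim_equal_compute_num : Prop := ∀ (bin_num : String) (idx : Int), Dom_compute_num bin_num idx → Pre_compute_num bin_num idx → Spec_compute_num bin_num idx (compute_num bin_num idx)

-- ===== LEMMAS AND PROOFS =====

theorem pvGroups_succ (s : List Char) (idx : Int) (k : Nat) :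
    pvGroups s idx (k + 1)
      = PySem.List.slice s (some (idx + 1)) (some (idx + 5)) :: pvGroups s (idx + 5) k := by
  unfold pvGroups
  rw [List.range_succ_eq_map, List.map_cons, List.map_map]
  congr 1
  · norm_num
  · apply List.map_congr_left
    intro j _
    simp only [Function.comp_apply]
    congr 2 <;> push_cast <;> ring

theorem loopA_eq : ∀ (k : Nat) (s : List Char) (idx : Int) (n : List Char),
    PySem.List.pyGet? s (idx + 5 * k) = some '0' →
    (∀ j < k, ∃ c, PySem.List.pyGet? s (idx + 5 * j) = some c ∧ c ≠ '0') →
    computeNumLoop s idx n = (idx + 5 * (k + 1), pvBin (n ++ (pvGroups s idx k).flatten)) := by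
  intro k
  induction k with
  | zero =>
    intro s idx n hflag _
    simp only [Nat.cast_zero, mul_zero, add_zero] at hflag
    rw [computeNumLoop]
    split
    · simp_all
    · next c hc =>
      rw [hflag] at hc; cases hc
      simp [pvGroups]
  | succ k ih =>
    intro s idx n hflag hflags
    obtain ⟨c0, hx, hc0⟩ := hflags 0 (Nat.succ_pos k)
    simp only [Nat.cast_zero, mul_zero, add_zero] at hx
    rw [computeNumLoop]
    split
    · simp_all
    · next c hc =>
      rw [hx] at hc; cases hc
      simp only [ne_eq, hc0, not_false_eq_true, if_true]
      rw [ih s (idx + 5) _ ?_ ?_]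
      · rw [pvGroups_succ]
        simp only [List.flatten_cons, List.append_assoc, Prod.mk.injEq, and_true]
        push_cast; ring
      · rw [show idx + 5 + 5 * (k : Int) = idx + 5 * (((k : Nat) + 1 : Nat) : Int) by push_cast; ring]
        exact hflag
      · intro j hj
        rw [show idx + 5 + 5 * (j : Int) = idx + 5 * (((j : Nat) + 1 : Nat) : Int) by push_cast; ring]
        exact hflags (j + 1) (by omega)

theorem count_eq : ∀ (d : Nat) (s : List Char) (idx : Int) (k j : Nat), k = j + d →
    PySem.List.pyGet? s (idx + 5 * k) = some '0' →
    (∀ i < k, ∃ c, PySem.List.pyGet? s (idx + 5 * i) = some c ∧ c ≠ '0') →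
    countGroups s idx j = k := by
  intro d
  induction d with
  | zero =>
    intro s idx k j hk hflag _
    subst hk
    rw [countGroups]
    split
    · simp_all
    · next c hc =>
      rw [hflag] at hc; cases hc
      simp
  | succ d ih =>
    intro s idx k j hk hflag hflags
    obtain ⟨c0, hx, hc0⟩ := hflags j (by omega)
    rw [countGroups]
    split
    · simp_all
    · next c hc =>
      rw [hx] at hc; cases hc
      simp only [ne_eq, hc0, not_false_eq_true, if_true]
      exact ih s idx k (j + 1) (by omega) hflag hflags

theorem flags_of_pre (s : List Char) (idx : Int) (k : Nat)
    (h : (List.range k).all (pvFlagNot0 s idx) = true) :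
    ∀ j < k, ∃ c, PySem.List.pyGet? s (idx + 5 * j) = some c ∧ c ≠ '0' := by
  intro j hj
  have hb := List.all_eq_true.mp h j (List.mem_range.mpr hj)
  revert hb
  unfold pvFlagNot0
  cases hg : PySem.List.pyGet? s (idx + 5 * j) with
  | none => simp
  | some c =>
    intro hb
    exact ⟨c, rfl, by simpa using hb⟩

-- ===== VERDICT (by name: the statement is the Claim_ definition above) =====
theorem compute_num_spec : Claim_equal_compute_num := by
  intro bin_num idx _ hpre
  obtain ⟨k, hkb, hp⟩ := hpre
  unfold pvPreAt at hp
  simp only [Bool.and_eq_true, beq_iff_eq] at hp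
  obtain ⟨⟨⟨hall, hflag⟩, -⟩, -⟩ := hp
  have hflags := flags_of_pre bin_num.toList idx k hall
  unfold Spec_compute_num compute_num compute_num_alt
  rw [loopA_eq k bin_num.toList idx [] hflag hflags,
    count_eq k bin_num.toList idx k 0 (by omega) hflag hflags]
  simp
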